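-- pv_equiv track=rewrite | github.com/Saurav-TB-Pandey/Code-Chef-Problems | String Problems/EZSPEAK.py | isEasy
-- ===== SOURCE A (Python) =====
-- def  isEasy(string, lengthOfStr) :
--     vowel = ['a', 'e', 'i', 'o', 'u']
--     if lengthOfStr < 4 :
--         return 'Yes'
--     else :
--         for i in range(lengthOfStr - 3) :
--             if string[i] not in vowel and string[i+1] not in vowel and string[i+2] not in vowel and string[i+3] not in vowel:
--                 return 'No'
--         else :
--             return 'Yes'
-- ===== SOURCE B (Python) =====
-- def isEasy(string, lengthOfStr):
--     if lengthOfStr < 4: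
--         return 'Yes'
--     best = 0
--     cur = 0
--     for ch in string[:lengthOfStr]:
--         if ch in 'aeiou':
--             cur = 0
--         else:
--             cur = cur + 1
--         if cur > best:
--             best = cur
--     return 'No' if best >= 4 else 'Yes'
-- ===== Notes on version B (the rewrite author's own statement) =====
-- stated objective: alternative
-- what changed: Replaces A's indexed scan that re-tests a 4-wide window at every start position with a single character-iteration over the sliced prefix that computes the maximum consecutive-consonant run length and compares it to 4 at the end.
-- outside the precondition, e.g. on isEasy('bbbb', 10): A returns 'No', B returns 'No'; on isEasy('aaaa', 10): A raises IndexError, B returns 'Yes'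
import Mathlib
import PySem

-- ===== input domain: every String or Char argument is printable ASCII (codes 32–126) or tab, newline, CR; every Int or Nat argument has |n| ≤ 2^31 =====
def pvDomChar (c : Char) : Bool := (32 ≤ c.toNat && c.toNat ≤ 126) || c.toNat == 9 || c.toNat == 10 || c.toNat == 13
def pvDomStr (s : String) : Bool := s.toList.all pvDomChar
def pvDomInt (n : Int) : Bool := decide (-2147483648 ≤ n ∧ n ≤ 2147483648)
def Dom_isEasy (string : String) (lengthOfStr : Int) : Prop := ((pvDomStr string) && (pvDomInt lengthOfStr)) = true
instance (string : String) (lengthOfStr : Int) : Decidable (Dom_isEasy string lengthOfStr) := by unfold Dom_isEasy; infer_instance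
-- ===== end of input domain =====

-- B replaces A's per-position 4-wide window scan with one pass over the sliced prefix
-- computing the maximum consecutive-consonant run length; same results on Pre_, similar cost.


-- ===== PORT A =====
def pvVowel : List Char := ['a', 'e', 'i', 'o', 'u']

-- string[i] not in vowel; `none` (IndexError) cannot occur inside Pre_, mapped to `false`
def pvConsAt (s : List Char) (i : Int) : Bool :=
  match PySem.List.pyGet? s i with
  | some c => !(pvVowel.contains c)
  | none => false

-- the `for i in range(lengthOfStr - 3)` loop of A, over the remaining index list
def pvLoopA (s : List Char) : List Int → String
  | [] => "Yes"
  | i :: rest =>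
    if pvConsAt s i && pvConsAt s (i + 1) && pvConsAt s (i + 2) && pvConsAt s (i + 3) then "No"
    else pvLoopA s rest

def isEasy (string : String) (lengthOfStr : Int) : String :=
  if lengthOfStr < 4 then "Yes"
  else pvLoopA string.toList (PySem.List.pyRange 0 (lengthOfStr - 3) 1)

-- ===== PORT B =====
-- one step of B's loop body: update (best, cur) from the next character
def pvStep (bc : Nat × Nat) (ch : Char) : Nat × Nat :=
  let cur := if "aeiou".toList.contains ch then 0 else bc.2 + 1
  (if cur > bc.1 then cur else bc.1, cur)

def isEasy_alt (string : String) (lengthOfStr : Int) : String :=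
  if lengthOfStr < 4 then "Yes"
  else
    -- `for ch in string[:lengthOfStr]` carrying (best, cur)
    let p := (PySem.List.slice string.toList none (some lengthOfStr)).foldl pvStep (0, 0)
    if 4 ≤ p.1 then "No" else "Yes"

-- ===== PRECONDITION & SPEC =====
-- Pre_ excludes lengthOfStr ≥ 4 exceeding the string's length: there A indexes past the end
-- and raises IndexError unless short-circuit evaluation happens to return first.
def Pre_isEasy (string : String) (lengthOfStr : Int) : Prop :=
  lengthOfStr < 4 ∨ lengthOfStr ≤ (string.toList.length : Int)
instance (string : String) (lengthOfStr : Int) : Decidable (Pre_isEasy string lengthOfStr) := by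
  unfold Pre_isEasy; infer_instance

def pvWitness_isEasy : String × Int := ("abcd", 4)

def Spec_isEasy (string : String) (lengthOfStr : Int) (out : String) : Prop := out = isEasy_alt string lengthOfStr
instance (string : String) (lengthOfStr : Int) (out : String) : Decidable (Spec_isEasy string lengthOfStr out) := by unfold Spec_isEasy; infer_instance

-- ===== CLAIM (what is proved, stated in full; the proofs are below) =====
def Claim_equal_isEasy : Prop := ∀ (string : String) (lengthOfStr : Int), Dom_isEasy string lengthOfStr → Pre_isEasy string lengthOfStr → Spec_isEasy string lengthOfStr (isEasy string lengthOfStr)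

-- ===== LEMMAS AND PROOFS =====

-- consonant test on a plain character
def pvC (c : Char) : Bool := !(pvVowel.contains c)

-- "the list has a window of 4 consecutive consonants" (A's view)
def pvWin : List Char → Bool
  | c1 :: c2 :: c3 :: c4 :: rest =>
      (pvC c1 && pvC c2 && pvC c3 && pvC c4) || pvWin (c2 :: c3 :: c4 :: rest)
  | _ => false

-- "the first m characters exist and are all consonants"
def pvPre : List Char → Nat → Bool
  | _, 0 => true
  | [], _ + 1 => false
  | c :: rest, m + 1 => pvC c && pvPre rest m

-- "starting with a running count, some position completes a run of 4 consonants"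
def pvRun : List Char → Nat → Bool
  | [], _ => false
  | c :: rest, run =>
    if pvC c then (if run + 1 == 4 then true else pvRun rest (run + 1))
    else pvRun rest 0

theorem pvConsAt_eq (s : List Char) (i : Nat) (h : i < s.length) :
    pvConsAt s (i : Int) = pvC s[i] := by
  simp [pvConsAt, pvC, PySem.List.pyGet?_natCast, List.getElem?_eq_getElem h]

theorem pvWin_short (t : List Char) (h : t.length < 4) : pvWin t = false := by
  match t with
  | [] => rfl
  | [_] => rfl
  | [_, _] => rfl
  | [_, _, _] => rfl
  | _ :: _ :: _ :: _ :: _ => simp at h; omega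

theorem pvWin_eq (t : List Char) : pvWin t = (pvPre t 4 || pvWin t.tail) := by
  match t with
  | [] => rfl
  | [a] => simp [pvWin, pvPre]
  | [a, b] => simp [pvWin, pvPre]
  | [a, b, c] => simp [pvWin, pvPre]
  | a :: b :: c :: d :: r =>
    simp only [pvWin, pvPre, List.tail_cons]
    cases pvC a <;> cases pvC b <;> cases pvC c <;> cases pvC d <;> simp

theorem pvPre_mono (t : List Char) : ∀ m m' : Nat, m' ≤ m → pvPre t m = true → pvPre t m' = true := by
  induction t with
  | nil =>
    intro m m' h hp
    cases m with
    | zero => cases Nat.le_zero.mp h; exact hp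
    | succ k => simp [pvPre] at hp
  | cons c rest ih =>
    intro m m' h hp
    cases m' with
    | zero => rfl
    | succ k' =>
      cases m with
      | zero => omega
      | succ k =>
        simp only [pvPre, Bool.and_eq_true] at hp ⊢
        exact ⟨hp.1, ih k k' (Nat.succ_le_succ_iff.mp h) hp.2⟩

theorem pvPre4_or_win (t : List Char) : (pvPre t 4 || pvWin t) = pvWin t := by
  rw [pvWin_eq t, ← Bool.or_assoc, Bool.or_self]

theorem pvRun_eq (t : List Char) : ∀ k : Nat, k ≤ 3 → pvRun t k = (pvPre t (4 - k) || pvWin t) := by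
  induction t with
  | nil =>
    intro k hk
    have h4 : 4 - k = (3 - k) + 1 := by omega
    simp [pvRun, h4, pvPre, pvWin]
  | cons c rest ih =>
    intro k hk
    have h4 : 4 - k = (3 - k) + 1 := by omega
    by_cases hc : pvC c = true
    · by_cases hk3 : k = 3
      · subst hk3
        simp [pvRun, pvPre, pvC]
        simp [pvC] at hc
        simp [hc]
      · have hk2 : k + 1 ≤ 3 := by omega
        have hne : (k + 1 == 4) = false := by
          simp only [beq_eq_false_iff_ne]; omega
        have step : pvRun (c :: rest) k = pvRun rest (k + 1) := by
          simp [pvRun, hc, hne]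
        rw [step, ih (k + 1) hk2]
        have h43 : 4 - (k + 1) = 3 - k := by omega
        rw [h43]
        rw [h4]
        simp only [pvPre, hc, Bool.true_and]
        rw [pvWin_eq (c :: rest), List.tail_cons]
        cases hpw : pvPre (c :: rest) 4 with
        | false => simp
        | true =>
          have h3 : pvPre rest 3 = true := by
            simp only [pvPre, Bool.and_eq_true] at hpw; exact hpw.2
          have h3k : pvPre rest (3 - k) = true :=
            pvPre_mono rest 3 (3 - k) (by omega) h3
          simp [h3k]
    · have hc' : pvC c = false := by simpa using hc
      have step : pvRun (c :: rest) k = pvRun rest 0 := by simp [pvRun, hc']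
      rw [step, ih 0 (by omega)]
      rw [h4]
      simp only [pvPre, hc', Bool.false_and, Bool.false_or]
      rw [pvWin_eq (c :: rest), List.tail_cons]
      simp only [pvPre, hc', Bool.false_and, Bool.false_or]
      exact (pvPre4_or_win rest).symm ▸ rfl

theorem pvWin_expand (t : List Char) (h : 4 ≤ t.length) :
    pvWin t = ((pvC t[0] && pvC t[1] && pvC t[2] && pvC t[3]) || pvWin t.tail) := by
  match t with
  | [] => simp at h
  | [_] => simp at h
  | [_, _] => simp at h
  | [_, _, _] => simp at h
  | a :: b :: c :: d :: r =>
    simp only [pvWin, List.getElem_cons_zero, List.getElem_cons_succ, List.tail_cons]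

theorem pvLoopA_eq (s : List Char) (n : Nat) (hn : n ≤ s.length) :
    ∀ (m i : Nat), i + m + 3 = n →
      pvLoopA s (PySem.List.pyRange (i : Int) ((n : Int) - 3) 1) =
        (if pvWin ((s.take n).drop i) then "No" else "Yes") := by
  intro m
  induction m with
  | zero =>
    intro i h
    rw [PySem.List.pyRange_one_eq_nil (by omega)]
    have hlen : ((s.take n).drop i).length < 4 := by simp; omega
    simp [pvLoopA, pvWin_short _ hlen]
  | succ m ih =>
    intro i h
    have hi : (i : Int) < (n : Int) - 3 := by exact_mod_cast (by omega : (i : Int) < (n : Int) - 3)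
    have hlen4 : 4 ≤ ((s.take n).drop i).length := by simp; omega
    have hc1 : ((i : Int) + 1) = ((i + 1 : Nat) : Int) := by push_cast; ring
    have hc2 : ((i : Int) + 2) = ((i + 2 : Nat) : Int) := by push_cast; ring
    have hc3 : ((i : Int) + 3) = ((i + 3 : Nat) : Int) := by push_cast; ring
    rw [PySem.List.pyRange_one_cons hi, pvWin_expand _ hlen4]
    simp only [pvLoopA, hc1, hc2, hc3,
      pvConsAt_eq s i (by omega), pvConsAt_eq s (i+1) (by omega),
      pvConsAt_eq s (i+2) (by omega), pvConsAt_eq s (i+3) (by omega),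
      List.getElem_drop, List.getElem_take, List.tail_drop, Nat.add_zero]
    by_cases hw : (pvC s[i] && pvC s[i+1] && pvC s[i+2] && pvC s[i+3]) = true
    · simp [hw]
    · have hw' : (pvC s[i] && pvC s[i+1] && pvC s[i+2] && pvC s[i+3]) = false := by
        simpa using hw
      simp only [hw', Bool.false_or, Bool.false_eq_true]
      exact ih (i + 1) (by omega)

-- the vowel test of B's step is the consonant test negated
theorem pvStep_cons (bc : Nat × Nat) (ch : Char) :
    pvStep bc ch =
      (let cur := if pvC ch then bc.2 + 1 else 0
       (if cur > bc.1 then cur else bc.1, cur)) := by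
  have hv : "aeiou".toList = pvVowel := by decide
  simp [pvStep, pvC, hv]

-- best never decreases along the fold
theorem pvFold_mono (t : List Char) : ∀ b k : Nat, b ≤ (t.foldl pvStep (b, k)).1 := by
  induction t with
  | nil => intro b k; simp
  | cons c rest ih =>
    intro b k
    rw [List.foldl_cons, pvStep_cons]
    by_cases hc : pvC c = true
    · simp only [hc, if_true]
      by_cases hgt : k + 1 > b
      · simp only [hgt, if_true]; exact le_trans (by omega) (ih (k+1) (k+1))
      · simp only [hgt, if_false]; exact ih b (k+1)
    · have hc' : pvC c = false := by simpa using hc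
      simp only [hc', Bool.false_eq_true, if_false]
      by_cases hgt : (0:Nat) > b
      · omega
      · simp only [hgt, if_false]; exact ih b 0

-- the fold reaches best ≥ 4 exactly when it started ≥ 4 or the state machine fires
theorem pvFold_run (t : List Char) : ∀ b k : Nat, k ≤ 3 →
    ((4 ≤ (t.foldl pvStep (b, k)).1) ↔ (4 ≤ b ∨ pvRun t k = true)) := by
  induction t with
  | nil => intro b k hk; simp [pvRun]
  | cons c rest ih =>
    intro b k hk
    rw [List.foldl_cons, pvStep_cons]
    by_cases hc : pvC c = true
    · simp only [hc, if_true]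
      by_cases hk3 : k = 3
      · subst hk3
        have hrun : pvRun (c :: rest) 3 = true := by simp [pvRun, hc]
        constructor
        · intro _; right; exact hrun
        · intro _
          by_cases hgt : 3 + 1 > b
          · simp only [hgt, if_true]
            exact le_trans (by omega) (pvFold_mono rest 4 4)
          · simp only [hgt, if_false]
            exact le_trans (by omega) (pvFold_mono rest b 4)
      · have hk2 : k + 1 ≤ 3 := by omega
        have hne : (k + 1 == 4) = false := by simp only [beq_eq_false_iff_ne]; omega
        have hrun : pvRun (c :: rest) k = pvRun rest (k + 1) := by simp [pvRun, hc, hne]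
        rw [hrun]
        by_cases hgt : k + 1 > b
        · simp only [hgt, if_true]
          rw [ih (k+1) (k+1) hk2]
          constructor
          · rintro (h4 | h)
            · omega
            · exact Or.inr h
          · rintro (h4 | h)
            · omega
            · exact Or.inr h
        · simp only [hgt, if_false]
          exact ih b (k+1) hk2
    · have hc' : pvC c = false := by simpa using hc
      have hrun : pvRun (c :: rest) k = pvRun rest 0 := by simp [pvRun, hc']
      simp only [hc', Bool.false_eq_true, if_false]
      rw [hrun]
      by_cases hgt : (0:Nat) > b
      · omega
      · simp only [hgt, if_false]
        exact ih b 0 (by omega)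

-- ===== VERDICT (by name: the statement is the Claim_ definition above) =====
theorem isEasy_spec : Claim_equal_isEasy := by
  intro string L _ hpre
  unfold Spec_isEasy isEasy isEasy_alt
  by_cases hL : L < 4
  · simp [hL]
  · simp only [hL, if_false]
    have h4 : 4 ≤ L := by omega
    have hlen : L ≤ (string.toList.length : Int) := by
      rcases hpre with h | h
      · omega
      · exact h
    set s := string.toList with hs
    have hLn : L = ((L.toNat : Nat) : Int) := by omega
    set n := L.toNat with hnn
    have hn4 : 4 ≤ n := by omega
    have hns : n ≤ s.length := by omega
    rw [hLn]
    have ha := pvLoopA_eq s n hns (n - 3) 0 (by omega)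
    simp only [Nat.cast_zero] at ha
    rw [ha, List.drop_zero]
    rw [PySem.List.slice_to_natCast]
    have hb := pvFold_run (s.take n) 0 0 (by omega)
    have hr := pvRun_eq (s.take n) 0 (by omega)
    rw [hr] at hb
    simp only [Nat.sub_zero, pvPre4_or_win] at hb
    by_cases hw : pvWin (s.take n) = true
    · have : 4 ≤ ((s.take n).foldl pvStep (0, 0)).1 := hb.mpr (Or.inr hw)
      simp [hw, this]
    · have hnot : ¬ 4 ≤ ((s.take n).foldl pvStep (0, 0)).1 := by
        intro h
        rcases hb.mp h with h0 | h1
        · omega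
        · exact hw h1
      simp [hw, hnot]
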